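-- pv_equiv track=rewrite | github.com/legesher/research | expedition-tiny-aya/data-pipeline/scripts/harmonize_splits.py | _compute_intersection
-- ===== SOURCE A (Python) =====
-- EXPECTED_SPLITS = ("train", "validation")
--
-- def _compute_intersection(
--     cell_sets: dict[str, dict[str, set[int]]],
-- ) -> tuple[dict[str, set[int]], dict[str, dict[int, list[str]]]]:
--     """Intersect idx sets per split; track which cells dropped each idx.
--
--     Returns ``(intersections, dropped_attribution)`` where:
--     - ``intersections[split]`` is the set of idx present in ALL cells
--     - ``dropped_attribution[split][idx]`` lists cells that DIDN'T have idx
--       (only present for idx values in the union but not the intersection)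
--     """
--     intersections: dict[str, set[int]] = {}
--     dropped_attribution: dict[str, dict[int, list[str]]] = {}
--
--     for split in EXPECTED_SPLITS:
--         per_cell = {
--             name: splits[split] for name, splits in cell_sets.items() if split in splits
--         }
--         if not per_cell:
--             intersections[split] = set()
--             dropped_attribution[split] = {}
--             continue
--
--         union: set[int] = set().union(*per_cell.values())
--         intersection: set[int] = set.intersection(*per_cell.values())
--         intersections[split] = intersection
--
--         attribution: dict[int, list[str]] = {}
--         for idx in sorted(union - intersection):
--             missing_from = sorted(
--                 cell for cell, idx_set in per_cell.items() if idx not in idx_set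
--             )
--             attribution[idx] = missing_from
--         dropped_attribution[split] = attribution
--
--     return intersections, dropped_attribution
-- ===== SOURCE B (Python) =====
-- EXPECTED_SPLITS = ("train", "validation")
--
-- def _compute_intersection(cell_sets):
--     intersections = {}
--     dropped_attribution = {}
--     for split in EXPECTED_SPLITS:
--         # list of (name, idx_set) pairs instead of A's dict
--         cells = [(name, sp[split]) for name, sp in cell_sets.items() if split in sp]
--         if not cells:
--             intersections[split] = set()
--             dropped_attribution[split] = {}
--             continue
--
--         union = {i for _, s in cells for i in s}
--
--         # Inverted attribution: walk the cells once in sorted name order and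
--         # append each cell to the attribution entry of every idx it lacks; the
--         # lists come out sorted without any per-idx scan or sort.
--         attribution = {}
--         for name, idx_set in sorted(cells):
--             for idx in union - idx_set:
--                 attribution.setdefault(idx, []).append(name)
--
--         # intersection = union elements no cell dropped
--         intersections[split] = {i for i in union if i not in attribution}
--         dropped_attribution[split] = {i: attribution[i] for i in sorted(attribution)}
--     return intersections, dropped_attribution
-- ===== Notes on version B (the rewrite author's own statement) =====
-- stated objective: alternative
-- what changed: B inverts the attribution: instead of scanning every cell (and sorting the matching names) for each idx in union-minus-intersection, it keeps the cells as a sorted list of pairs, appends each cell once to the attribution entry of every idx it lacks, and derives the intersection as the union elements with no attribution entry.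
import Mathlib
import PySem

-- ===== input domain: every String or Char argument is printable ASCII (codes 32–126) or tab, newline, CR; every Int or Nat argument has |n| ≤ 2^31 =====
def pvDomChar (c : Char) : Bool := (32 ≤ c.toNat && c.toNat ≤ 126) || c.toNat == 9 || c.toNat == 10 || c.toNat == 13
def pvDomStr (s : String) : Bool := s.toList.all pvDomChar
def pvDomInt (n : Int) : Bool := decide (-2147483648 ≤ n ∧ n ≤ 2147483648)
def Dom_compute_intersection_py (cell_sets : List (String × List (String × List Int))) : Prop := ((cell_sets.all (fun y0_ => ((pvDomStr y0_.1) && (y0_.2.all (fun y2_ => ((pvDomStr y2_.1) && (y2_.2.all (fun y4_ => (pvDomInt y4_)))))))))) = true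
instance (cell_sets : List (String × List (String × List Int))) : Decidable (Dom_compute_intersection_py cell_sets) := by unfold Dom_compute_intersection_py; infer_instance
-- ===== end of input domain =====

-- B inverts A's attribution loop: instead of scanning every cell for each dropped idx
-- (and sorting the cell list per idx), it walks the cells once in sorted name order,
-- appends each cell to the attribution entry of every idx it is missing, and recovers
-- the intersection as the union elements with no attribution entry (objective: alternative).

-- ===== PORT A =====
def pvSplitsA : List String := ["train", "validation"]

-- A's dict comprehension `{name: splits[split] for … if split in splits}`
def pvPerCellA (split : String) (cell_sets : List (String × List (String × List Int))) :
    List (String × List Int) :=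
  cell_sets.filterMap (fun p => ((PySem.Dict.mk p.2).get? split).map (fun v => (p.1, v)))

-- A's `set().union(*per_cell.values())`
def pvUnionA (per_cell : List (String × List Int)) : PySem.Set Int :=
  (per_cell.map (·.2)).foldl (fun s v => PySem.Set.update s v) PySem.Set.empty

-- body of A's loop for one split: (intersections[split], dropped_attribution[split].items)
def pvA_split (cell_sets : List (String × List (String × List Int))) (split : String) :
    List Int × List (Int × List String) :=
  match pvPerCellA split cell_sets with
  | [] => ([], [])
  | f :: r =>
    let union := pvUnionA (f :: r)
    let inter := r.foldl (fun s p => PySem.Set.inter s p.2) (PySem.Set.ofList f.2)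
    let dropped := (PySem.List.sorted (PySem.Set.diff union inter) (fun x => x)).map
      (fun idx => (idx, PySem.List.sorted
        (((f :: r).filter (fun p => !(p.2.contains idx))).map (·.1)) (fun x => x)))
    (inter, dropped)

def compute_intersection_py (cell_sets : List (String × List (String × List Int))) :
    (List (String × List Int)) × (List (String × List (Int × List String))) :=
  (pvSplitsA.map (fun s => (s, (pvA_split cell_sets s).1)),
   pvSplitsA.map (fun s => (s, (pvA_split cell_sets s).2)))

-- ===== PORT B =====
-- B's list comprehension `[(name, sp[split]) for name, sp in cell_sets.items() if split in sp]`
def pvCellsB (split : String) (cell_sets : List (String × List (String × List Int))) :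
    List (String × List Int) :=
  cell_sets.foldr
    (fun p acc =>
      match (PySem.Dict.mk p.2).get? split with
      | some v => (p.1, v) :: acc
      | none => acc) []

-- body of B's loop for one split: attribution built cell-by-cell, intersection derived
def pvB_split (cell_sets : List (String × List (String × List Int))) (split : String) :
    List Int × List (Int × List String) :=
  match pvCellsB split cell_sets with
  | [] => ([], [])
  | c₀ :: cs =>
    let union := PySem.Set.ofList ((c₀ :: cs).flatMap (·.2))   -- {i for _, s in cells for i in s}
    let attribution :=
      ((PySem.List.sorted (c₀ :: cs) (·.1)).flatMap
          (fun p => (PySem.Set.diff union p.2).map (fun i => (i, p.1)))).foldl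
        (fun d q => d.modify q.1 [] (fun v => v ++ [q.2])) (PySem.Dict.mk [])
    (union.filter (fun i => !(attribution.contains i)),
     (PySem.List.sorted attribution.keys (fun x => x)).map
       (fun i => (i, attribution.getD i [])))

def compute_intersection_py_alt (cell_sets : List (String × List (String × List Int))) :
    (List (String × List Int)) × (List (String × List (Int × List String))) :=
  ["train", "validation"].foldl
    (fun acc split =>
      let r := pvB_split cell_sets split
      (acc.1 ++ [(split, r.1)], acc.2 ++ [(split, r.2)]))
    ([], [])

-- ===== PRECONDITION & SPEC =====
def Spec_compute_intersection_py (cell_sets : List (String × List (String × List Int))) (out : (List (String × List Int)) × (List (String × List (Int × List String)))) : Prop := out = compute_intersection_py_alt cell_sets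
instance (cell_sets : List (String × List (String × List Int))) (out : (List (String × List Int)) × (List (String × List (Int × List String)))) : Decidable (Spec_compute_intersection_py cell_sets out) := by unfold Spec_compute_intersection_py; infer_instance

-- ===== CLAIM (what is proved, stated in full; the proofs are below) =====
def Claim_equal_compute_intersection_py : Prop := ∀ (cell_sets : List (String × List (String × List Int))), Dom_compute_intersection_py cell_sets → Spec_compute_intersection_py cell_sets (compute_intersection_py cell_sets)

-- ===== LEMMAS AND PROOFS =====

-- B's foldr pair-list builder computes the same cell list as A's filterMap comprehension
theorem pvCellsB_eq (split : String) (cell_sets : List (String × List (String × List Int))) :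
    pvCellsB split cell_sets = pvPerCellA split cell_sets := by
  unfold pvCellsB pvPerCellA
  induction cell_sets with
  | nil => rfl
  | cons p ps ih =>
    simp only [List.foldr_cons, List.filterMap_cons]
    cases h : (PySem.Dict.mk p.2).get? split <;> simp [ih]

-- `set().union(*vals)` is one foldl of Set.add over the concatenated element lists
theorem pvUnionA_eq (l : List (String × List Int)) :
    pvUnionA l = PySem.Set.ofList ((l.map (·.2)).flatten) := by
  unfold pvUnionA PySem.Set.ofList PySem.Set.update
  rw [List.foldl_flatten]

-- B's set comprehension over the flattened pairs is the same union
theorem pvUnionB_eq (l : List (String × List Int)) :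
    PySem.Set.ofList (l.flatMap (·.2)) = pvUnionA l := by
  rw [pvUnionA_eq, List.flatMap_def]

theorem pvUnionA_nodup (l : List (String × List Int)) : (pvUnionA l).Nodup := by
  rw [pvUnionA_eq]; exact PySem.Set.nodup_ofList _

-- adding only fresh elements does not change a filter that implies membership in the base
theorem pv_filter_foldl_add (P : Int → Bool) (xs : List Int) :
    ∀ s : PySem.Set Int, (∀ x, P x = true → x ∈ s) →
      (xs.foldl PySem.Set.add s).filter P = s.filter P := by
  induction xs with
  | nil => intro s _; rfl
  | cons x xs ih =>
    intro s hs
    simp only [List.foldl_cons]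
    by_cases hx : x ∈ s
    · rw [PySem.Set.add_of_mem hx]; exact ih s hs
    · rw [PySem.Set.add_of_not_mem hx]
      have h1 : ∀ y, P y = true → y ∈ s ++ [x] := fun y hy =>
        List.mem_append.mpr (Or.inl (hs y hy))
      rw [ih (s ++ [x]) h1, List.filter_append]
      have hPx : P x = false := by
        cases hPx : P x with
        | false => rfl
        | true => exact absurd (hs x hPx) hx
      simp [hPx]

-- the fold of pairwise intersections is one filter
theorem pv_foldl_inter (r : List (String × List Int)) :
    ∀ s : PySem.Set Int,
      r.foldl (fun s p => PySem.Set.inter s p.2) s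
        = s.filter (fun x => r.all (fun p => p.2.contains x)) := by
  induction r with
  | nil => intro s; simp
  | cons p r ih =>
    intro s
    simp only [List.foldl_cons, List.all_cons]
    rw [ih]
    unfold PySem.Set.inter
    rw [List.filter_filter]
    apply List.filter_congr
    intro x _
    rw [PySem.Set.contains_eq_listContains]
    exact Bool.and_comm _ _

-- A's intersection as a filter of the union
theorem pv_interA_eq (f : String × List Int) (r : List (String × List Int)) :
    (r.foldl (fun s p => PySem.Set.inter s p.2) (PySem.Set.ofList f.2))
      = (pvUnionA (f :: r)).filter (fun x => (f :: r).all (fun p => p.2.contains x)) := by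
  rw [pv_foldl_inter, pvUnionA_eq]
  have h1 : ((f :: r).map (·.2)).flatten = f.2 ++ (r.map (·.2)).flatten := by simp
  rw [h1]
  unfold PySem.Set.ofList
  rw [List.foldl_append]
  have hbase : ∀ x, ((f :: r).all (fun p => p.2.contains x)) = true →
      x ∈ (List.foldl PySem.Set.add PySem.Set.empty f.2) := by
    intro x hx
    have hf : f.2.contains x = true := by
      rw [List.all_eq_true] at hx
      exact hx f (List.mem_cons_self)
    have : x ∈ f.2 := List.contains_iff_mem.mp hf
    exact (PySem.Set.mem_ofList f.2 x).mpr this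
  rw [pv_filter_foldl_add _ _ _ hbase]
  apply List.filter_congr
  intro x hx
  have hxf : f.2.contains x = true :=
    List.contains_iff_mem.mpr ((PySem.Set.mem_ofList f.2 x).mp hx)
  rw [List.all_cons, hxf, Bool.true_and]

-- one cell's contribution to the attribution of idx
theorem pv_map_filter_fst (idx : Int) (nm : String) (d : List Int) (hd : d.Nodup) :
    ((d.map (fun i => (i, nm))).filter (fun q => q.1 == idx)).map (·.2)
      = if idx ∈ d then [nm] else [] := by
  induction d with
  | nil => rfl
  | cons a d ih =>
    rw [List.nodup_cons] at hd
    simp only [List.map_cons, List.filter_cons]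
    by_cases ha : a = idx
    · subst ha
      have hnd : a ∉ d := hd.1
      simp [ih hd.2, hnd]
    · simp [ha, ih hd.2, Ne.symm ha]

-- the pairs list filtered at idx lists exactly the cells missing idx
theorem pv_pairs_filter (idx : Int) (U : PySem.Set Int) (hU : U.Nodup) (hidx : idx ∈ U)
    (c : List (String × List Int)) :
    ((c.flatMap (fun p => (PySem.Set.diff U p.2).map (fun i => (i, p.1)))).filter
        (fun q => q.1 == idx)).map (·.2)
      = (c.filter (fun p => !(p.2.contains idx))).map (·.1) := by
  induction c with
  | nil => rfl
  | cons p c ih =>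
    rw [List.flatMap_cons, List.filter_append, List.map_append, ih, List.filter_cons]
    rw [pv_map_filter_fst idx p.1 _ (PySem.Set.nodup_diff U p.2 hU)]
    by_cases h : p.2.contains idx = true
    · have hnot : idx ∉ PySem.Set.diff U p.2 := fun hmem =>
        ((PySem.Set.mem_diff U p.2 idx).mp hmem).2 (List.contains_iff_mem.mp h)
      have hmemp : idx ∈ p.2 := List.contains_iff_mem.mp h
      simp [hnot, hmemp]
    · have hmem : idx ∈ PySem.Set.diff U p.2 :=
        (PySem.Set.mem_diff U p.2 idx).mpr ⟨hidx, fun hm => h (List.contains_iff_mem.mpr hm)⟩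
      have hmemp : idx ∉ p.2 := fun hm => h (List.contains_iff_mem.mpr hm)
      simp [hmem, hmemp]

theorem pv_attr_keys (pairs : List (Int × String)) :
    (pairs.foldl (fun d q => d.modify q.1 [] (fun v => v ++ [q.2]))
        (PySem.Dict.mk [])).keys
      = PySem.Set.ofList (pairs.map (·.1)) :=
  PySem.Dict.keys_foldl_modify_key pairs (fun q => q.1) ([] : List String)
    (fun _ q v => v ++ [q.2]) (PySem.Dict.mk [])

theorem pv_attr_keys_nodup (pairs : List (Int × String)) :
    (pairs.foldl (fun d q => d.modify q.1 [] (fun v => v ++ [q.2]))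
        (PySem.Dict.mk [])).keys.Nodup := by
  rw [pv_attr_keys]; exact PySem.Set.nodup_ofList _

theorem pv_attr_getD (pairs : List (Int × String)) (idx : Int) :
    (pairs.foldl (fun d q => d.modify q.1 [] (fun v => v ++ [q.2]))
        (PySem.Dict.mk [])).getD idx []
      = (pairs.filter (fun q => q.1 == idx)).map (·.2) := by
  have h := PySem.Dict.getD_foldl_modify_append pairs
    (PySem.Dict.mk ([] : List (Int × List String))) idx
  simpa using h

-- membership in the first components of the pairs list
theorem pv_mem_pairs_fst (U : PySem.Set Int) (c : List (String × List Int)) (x : Int) :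
    x ∈ (c.flatMap (fun p => (PySem.Set.diff U p.2).map (fun i => (i, p.1)))).map (·.1)
      ↔ x ∈ U ∧ ∃ p ∈ c, x ∉ p.2 := by
  simp only [List.mem_map, List.mem_flatMap]
  constructor
  · rintro ⟨q, ⟨p, hp, i, hi, rfl⟩, rfl⟩
    have := (PySem.Set.mem_diff U p.2 i).mp hi
    exact ⟨this.1, p, hp, this.2⟩
  · rintro ⟨hxU, p, hp, hxp⟩
    exact ⟨(x, p.1), ⟨p, hp, x, (PySem.Set.mem_diff U p.2 x).mpr ⟨hxU, hxp⟩, rfl⟩, rfl⟩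

-- a stable sort of the names commutes with filtering the cells
theorem pv_sorted_names (Q : String × List Int → Bool) (l : List (String × List Int)) :
    PySem.List.sorted ((l.filter Q).map (·.1)) (fun x => x)
      = ((PySem.List.sorted l (·.1)).filter Q).map (·.1) := by
  apply List.Perm.eq_of_pairwise (le := fun a b : String => a ≤ b)
  · intro a b _ _ hab hba; exact le_antisymm hab hba
  · exact PySem.List.sorted_pairwise _ (fun x => x)
  · rw [List.pairwise_map]
    exact List.Pairwise.sublist List.filter_sublist (PySem.List.sorted_pairwise l (·.1))
  · exact (PySem.List.sorted_perm _ _ _).trans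
      ((((PySem.List.sorted_perm l (·.1) false).filter Q).map (·.1)).symm)

theorem pv_split_eq (cell_sets : List (String × List (String × List Int))) (split : String) :
    pvA_split cell_sets split = pvB_split cell_sets split := by
  unfold pvA_split pvB_split
  rw [pvCellsB_eq]
  cases h : pvPerCellA split cell_sets with
  | nil => rfl
  | cons f r =>
    simp only [pvUnionB_eq]
    set U := pvUnionA (f :: r) with hUdef
    set cells := PySem.List.sorted (f :: r) (fun p => p.1) with hcells
    set pairs := cells.flatMap (fun p => (PySem.Set.diff U p.2).map (fun i => (i, p.1))) with hpairs
    set attr := pairs.foldl (fun d q => d.modify q.1 [] (fun v => v ++ [q.2])) (PySem.Dict.mk []) with hattr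
    have hNU : U.Nodup := pvUnionA_nodup _
    have hmemcells : ∀ p, p ∈ cells ↔ p ∈ f :: r := fun p =>
      (PySem.List.sorted_perm (f :: r) (fun p => p.1) false).mem_iff
    have hmemk : ∀ x, x ∈ attr.keys ↔ x ∈ U ∧ ∃ p ∈ f :: r, x ∉ p.2 := by
      intro x
      rw [hattr, pv_attr_keys, PySem.Set.mem_ofList, hpairs, pv_mem_pairs_fst]
      simp only [hmemcells]
    have hinterA := pv_interA_eq f r
    rw [← hUdef] at hinterA
    have hkeysnd : attr.keys.Nodup := by rw [hattr]; exact pv_attr_keys_nodup pairs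
    refine Prod.ext ?_ ?_
    · -- intersections agree
      show List.foldl (fun s p => s.inter p.2) (PySem.Set.ofList f.2) r
          = U.filter (fun idx => !(attr.contains idx))
      rw [hinterA]
      apply List.filter_congr
      intro x hxU
      by_cases hc : attr.contains x = true
      · obtain ⟨-, p, hp, hxp⟩ := (hmemk x).mp ((PySem.Dict.contains_iff_mem_keys attr x).mp hc)
        have hall : (f :: r).all (fun p => p.2.contains x) = false := by
          cases hB : (f :: r).all (fun p => p.2.contains x) with
          | false => rfl
          | true => exact absurd (List.contains_iff_mem.mp (List.all_eq_true.mp hB p hp)) hxp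
        rw [hc, hall]; rfl
      · have hcf : attr.contains x = false := Bool.eq_false_iff.mpr hc
        have hx : x ∉ attr.keys := fun hm => hc ((PySem.Dict.contains_iff_mem_keys attr x).mpr hm)
        have hall : (f :: r).all (fun p => p.2.contains x) = true := by
          rw [List.all_eq_true]
          intro p hp
          by_contra hpc
          exact hx ((hmemk x).mpr
            ⟨hxU, p, hp, fun hm => hpc (List.contains_iff_mem.mpr hm)⟩)
        rw [hall, hcf]; rfl
    · -- dropped attributions agree
      show (PySem.List.sorted
              (U.diff (List.foldl (fun s p => s.inter p.2) (PySem.Set.ofList f.2) r))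
              (fun x => x)).map
            (fun idx => (idx, PySem.List.sorted
              (((f :: r).filter (fun p => !p.2.contains idx)).map (fun x => x.1)) (fun x => x)))
          = (PySem.List.sorted attr.keys (fun x => x)).map
              (fun idx => (idx, attr.getD idx []))
      have hdiffmem : ∀ x, x ∈ U.diff (List.foldl (fun s p => s.inter p.2)
          (PySem.Set.ofList f.2) r) ↔ x ∈ U ∧ ∃ p ∈ f :: r, x ∉ p.2 := by
        intro x
        rw [hinterA, PySem.Set.mem_diff]
        constructor
        · rintro ⟨hxU, hxf⟩
          refine ⟨hxU, ?_⟩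
          by_contra hno
          push Not at hno
          apply hxf
          rw [List.mem_filter]
          refine ⟨hxU, ?_⟩
          rw [List.all_eq_true]
          exact fun p hp => List.contains_iff_mem.mpr (hno p hp)
        · rintro ⟨hxU, p, hp, hxp⟩
          refine ⟨hxU, fun hxf => ?_⟩
          rw [List.mem_filter, List.all_eq_true] at hxf
          exact hxp (List.contains_iff_mem.mp (hxf.2 p hp))
      have hLL : PySem.List.sorted
            (U.diff (List.foldl (fun s p => s.inter p.2) (PySem.Set.ofList f.2) r))
            (fun x => x)
          = PySem.List.sorted attr.keys (fun x => x) := by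
        rw [PySem.List.sorted_id_eq_sorted_id_iff_perm]
        refine (List.perm_ext_iff_of_nodup (PySem.Set.nodup_diff _ _ hNU) hkeysnd).mpr ?_
        intro a
        rw [hdiffmem, hmemk]
      rw [hLL]
      apply List.map_congr_left
      intro idx hidx
      have hkidx : idx ∈ attr.keys :=
        ((PySem.List.sorted_perm attr.keys (fun x => x) false).mem_iff).mp hidx
      obtain ⟨hidxU, -⟩ := (hmemk idx).mp hkidx
      refine Prod.ext rfl ?_
      show PySem.List.sorted
          (((f :: r).filter (fun p => !p.2.contains idx)).map (fun x => x.1)) (fun x => x)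
        = attr.getD idx []
      rw [hattr, pv_attr_getD, hpairs, pv_pairs_filter idx U hNU hidxU cells, hcells]
      exact pv_sorted_names _ _

-- ===== VERDICT (by name: the statement is the Claim_ definition above) =====
theorem compute_intersection_py_spec : Claim_equal_compute_intersection_py := by
  intro cell_sets _
  unfold Spec_compute_intersection_py compute_intersection_py compute_intersection_py_alt
  simp [pvSplitsA, pv_split_eq]
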